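-- pv_equiv track=rewrite | github.com/981377660LMT/algorithm-study | 7_graph/bfs求无权图的最短路径/bfs保持搜索顺序的性质/不连续字符串-dfs生成器搜索字典序.py | solve
-- ===== SOURCE A (Python) =====
-- from itertools import islice
-- from typing import Generator, List
--
-- def solve(n: int, k: int) -> str:
--     """
--     返回'0''1''2'组成的长为n的字典序的第k个字符串 相邻字符不能相同
--     用dfs搜，搜出来直接就是字典序，并且用生成器可以节省空间，加速
--     如果用bfs搜，搜出来是实际大小排序
--     """
--
--     def bt(index: int, pre: int, path: List[int]) -> Generator[str, None, None]:
--         if index == n: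
--             yield ''.join(map(str, path))
--             return
--
--         for next in range(3):
--             if next == pre:
--                 continue
--             path.append(next)
--             yield from bt(index + 1, next, path)
--             path.pop()
--
--     iter = bt(0, -1, [])
--     return next(islice(iter, k, None), '')
-- ===== SOURCE B (Python) =====
-- def solve(n: int, k: int) -> str:
--     """k-th lexicographic length-n string over '012' with no equal adjacent chars,
--     computed by combinatorial ranking (each chosen digit fixes a subtree of 2^remaining)."""
--     if n <= 0:
--         return ''
--     sub = 1 << (n - 1)
--     total = 3 * sub
--     if k < 0 or k >= total:
--         return ''
--     d = k // sub
--     r = k % sub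
--     digits = [d]
--     for _ in range(n - 1):
--         sub //= 2
--         idx = r // sub
--         r = r % sub
--         d = idx if idx < d else idx + 1
--         digits.append(d)
--     return ''.join(map(str, digits))
-- ===== Notes on version B (the rewrite author's own statement) =====
-- stated objective: faster
-- what changed: Replaces A's DFS generator that enumerates the first k+1 valid strings with direct combinatorial ranking: each digit is chosen by dividing the rank by the subtree size 2^(remaining), so no enumeration happens at all.
import Mathlib
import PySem

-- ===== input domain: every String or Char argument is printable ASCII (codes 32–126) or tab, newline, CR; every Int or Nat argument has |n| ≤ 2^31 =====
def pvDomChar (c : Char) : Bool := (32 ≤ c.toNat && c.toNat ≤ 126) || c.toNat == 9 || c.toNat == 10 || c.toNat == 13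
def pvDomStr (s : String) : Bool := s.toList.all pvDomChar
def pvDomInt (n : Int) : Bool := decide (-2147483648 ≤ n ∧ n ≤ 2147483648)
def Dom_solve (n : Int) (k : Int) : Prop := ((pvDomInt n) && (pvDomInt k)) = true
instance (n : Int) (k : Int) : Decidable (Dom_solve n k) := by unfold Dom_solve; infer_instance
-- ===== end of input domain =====

-- B replaces A's DFS enumeration of the first k+1 strings by O(n) combinatorial
-- ranking (digit = rank divided by subtree size 2^remaining); measured asymptotically faster.

-- ===== PORT A =====
-- ''.join(map(str, path))
def pyJoinDigits (path : List Int) : String :=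
  PySem.Str.join "" (path.map PySem.Int.toStr)

-- the generator bt in yield order, fused with its lazy consumer: islice(iter, k, None)
-- pulls at most k+1 yields, so every call carries the budget 'need' of yields still
-- demanded and stops (like the suspended generator) once it is exhausted;
-- fuel = n - index (Python's recursion ends exactly when index == n; for n < 0 Python
-- raises RecursionError, which Pre_solve excludes, so the fuel-0 fallback is unreachable on Pre_)
def btA (n : Int) (fuel : Nat) (index pre : Int) (path : List Int) (need : Nat) : List String :=
  if need = 0 then []
  else if index = n then [pyJoinDigits path]
  else
    match fuel with
    | 0 => []
    | f + 1 =>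
      -- the for-loop over range(3) unrolled (its three iterations, in order)
      let acc0 : List String := []
      let acc1 := if (0 : Int) = pre then acc0
        else acc0 ++ btA n f (index + 1) 0 (path ++ [(0 : Int)]) (need - acc0.length)
      let acc2 := if (1 : Int) = pre then acc1
        else acc1 ++ btA n f (index + 1) 1 (path ++ [(1 : Int)]) (need - acc1.length)
      if (2 : Int) = pre then acc2
      else acc2 ++ btA n f (index + 1) 2 (path ++ [(2 : Int)]) (need - acc2.length)
termination_by fuel

-- next(islice(iter, k, None), '') = the k-th yielded string, or '' when exhausted
def solve (n : Int) (k : Int) : String :=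
  ((btA n n.toNat 0 (-1) [] (k.toNat + 1)).drop k.toNat).headD ""

-- ===== PORT B =====
-- the for-loop over range(n-1) with state (sub, d, r, digits)
def solveAltLoop : Nat → Int → Int → Int → List Int → List Int
  | 0, _, _, _, digits => digits
  | c + 1, sub, d, r, digits =>
    let sub' := PySem.Int.floordiv sub 2
    let idx := PySem.Int.floordiv r sub'
    let r' := PySem.Int.mod r sub'
    let d' := if idx < d then idx else idx + 1
    solveAltLoop c sub' d' r' (digits ++ [d'])

def solve_alt (n : Int) (k : Int) : String :=
  if n ≤ 0 then ""
  else
    let sub : Int := 2 ^ (n - 1).toNat   -- 1 << (n-1), exact since n ≥ 1 here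
    let total : Int := 3 * sub
    if k < 0 ∨ total ≤ k then ""
    else
      let d := PySem.Int.floordiv k sub
      let r := PySem.Int.mod k sub
      pyJoinDigits (solveAltLoop (n - 1).toNat sub d r [d])

-- ===== PRECONDITION & SPEC =====
-- Pre_ excludes exactly the inputs where A raises: n < 0 (unbounded DFS recursion,
-- RecursionError) and k < 0 (islice raises ValueError).
def Pre_solve (n : Int) (k : Int) : Prop := 0 ≤ n ∧ 0 ≤ k
instance (n : Int) (k : Int) : Decidable (Pre_solve n k) := by unfold Pre_solve; infer_instance
def pvWitness_solve : Int × Int := (3, 4)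

def Spec_solve (n : Int) (k : Int) (out : String) : Prop := out = solve_alt n k
instance (n : Int) (k : Int) (out : String) : Decidable (Spec_solve n k out) := by unfold Spec_solve; infer_instance

-- ===== CLAIM (what is proved, stated in full; the proofs are below) =====
def Claim_equal_solve : Prop := ∀ (n : Int) (k : Int), Dom_solve n k → Pre_solve n k → Spec_solve n k (solve n k)

-- ===== LEMMAS AND PROOFS =====

-- the pure digit-list enumeration underlying bt
def allL : Nat → Int → List (List Int)
  | 0, _ => [[]]
  | m + 1, pre =>
      (if (0 : Int) = pre then [] else (allL m 0).map ((0 : Int) :: ·)) ++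
      ((if (1 : Int) = pre then [] else (allL m 1).map ((1 : Int) :: ·)) ++
       (if (2 : Int) = pre then [] else (allL m 2).map ((2 : Int) :: ·)))

-- the ranking recursion underlying B's loop, over Nat arithmetic
def rankRec : Nat → Int → Nat → List Int
  | 0, _, _ => []
  | m + 1, d, r =>
      let idx : Nat := r / 2 ^ m
      let d' : Int := if (idx : Int) < d then (idx : Int) else (idx : Int) + 1
      d' :: rankRec m d' (r % 2 ^ m)

lemma allL_length (m : Nat) (pre : Int) (h : pre = 0 ∨ pre = 1 ∨ pre = 2) :
    (allL m pre).length = 2 ^ m := by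
  induction m generalizing pre with
  | zero => simp [allL]
  | succ m ih =>
    have h2 : 2 ^ (m + 1) = 2 ^ m + 2 ^ m := by rw [pow_succ]; ring
    rcases h with rfl | rfl | rfl <;>
      simp [allL, ih 0 (by norm_num), ih 1 (by norm_num), ih 2 (by norm_num), h2]

lemma take_chain {α : Type} (l1 l2 : List α) (m : Nat) :
    l1.take m ++ l2.take (m - (l1.take m).length) = (l1 ++ l2).take m := by
  rw [List.take_append, List.length_take]
  congr 2
  omega

lemma btA_eq_allL (n : Int) (fuel : Nat) (index pre : Int) (path : List Int) (need : Nat)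
    (hidx : index + (fuel : Int) = n) (h0 : 0 ≤ index) :
    btA n fuel index pre path need =
      ((allL fuel pre).map (fun t => pyJoinDigits (path ++ t))).take need := by
  induction fuel generalizing index pre path need with
  | zero =>
    have hin : index = n := by omega
    cases need with
    | zero => simp [btA]
    | succ j => simp [btA, hin, allL]
  | succ f ih =>
    have hne : ¬ index = n := by omega
    cases need with
    | zero => simp [btA]
    | succ j =>
      have hrec : ∀ (nx : Int) (nd : Nat), btA n f (index + 1) nx (path ++ [nx]) nd =
          ((allL f nx).map (fun t => pyJoinDigits (path ++ nx :: t))).take nd := by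
        intro nx nd
        rw [ih (index + 1) nx (path ++ [nx]) nd (by push_cast at hidx ⊢; omega) (by omega)]
        congr 1
        refine List.map_congr_left (fun t _ => ?_)
        simp
      rw [btA]
      simp only [if_neg hne, Nat.succ_ne_zero, if_neg (Nat.succ_ne_zero j)]
      rw [allL]
      split_ifs <;>
        first
        | (exfalso; omega)
        | simp only [List.nil_append, List.length_nil, Nat.sub_zero, hrec, List.map_append,
            List.map_map, Function.comp_def, take_chain, List.take_nil, List.append_nil,
            List.append_assoc]

lemma allL_getElem (m : Nat) (pre : Int) (r : Nat)
    (h : pre = 0 ∨ pre = 1 ∨ pre = 2) (hr : r < 2 ^ m) :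
    (allL m pre)[r]? = some (rankRec m pre r) := by
  induction m generalizing pre r with
  | zero =>
    have hr0 : r = 0 := by simpa using hr
    subst hr0
    simp [allL, rankRec]
  | succ m ih =>
    have hpow : 2 ^ (m + 1) = 2 ^ m + 2 ^ m := by rw [pow_succ]; ring
    have hpos : 0 < 2 ^ m := Nat.two_pow_pos m
    have hlen : ∀ q : Int, q = 0 ∨ q = 1 ∨ q = 2 →
        ((allL m q).map (q :: ·)).length = 2 ^ m := by
      intro q hq; simp [allL_length m q hq]
    have single : ∀ (q : Int) (j : Nat), q = 0 ∨ q = 1 ∨ q = 2 → j < 2 ^ m →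
        ((allL m q).map (q :: ·))[j]? = some (q :: rankRec m q j) := by
      intro q j hq hj
      rw [List.getElem?_map, ih q j hq hj]
      rfl
    have take : ∀ (q : Int) (rest : List (List Int)) (j : Nat), q = 0 ∨ q = 1 ∨ q = 2 →
        j < 2 ^ m → ((allL m q).map (q :: ·) ++ rest)[j]? = some (q :: rankRec m q j) := by
      intro q rest j hq hj
      rw [List.getElem?_append_left (by rw [hlen q hq]; exact hj), single q j hq hj]
    have skip : ∀ (q : Int) (rest : List (List Int)) (j : Nat), q = 0 ∨ q = 1 ∨ q = 2 →
        2 ^ m ≤ j → ((allL m q).map (q :: ·) ++ rest)[j]? = rest[j - 2 ^ m]? := by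
      intro q rest j hq hj
      rw [List.getElem?_append_right (by rw [hlen q hq]; omega), hlen q hq]
    by_cases hlt : r < 2 ^ m
    · have hdiv : r / 2 ^ m = 0 := Nat.div_eq_of_lt hlt
      have hmod : r % 2 ^ m = r := Nat.mod_eq_of_lt hlt
      rcases h with rfl | rfl | rfl
      · rw [allL]; norm_num
        rw [take 1 _ r (by norm_num) hlt]
        simp [rankRec, hdiv, hmod]
      · rw [allL]; norm_num
        rw [take 0 _ r (by norm_num) hlt]
        simp [rankRec, hdiv, hmod]
      · rw [allL]; norm_num
        rw [take 0 _ r (by norm_num) hlt]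
        simp [rankRec, hdiv, hmod]
    · obtain ⟨s, rfl⟩ : ∃ s, r = 2 ^ m + s := ⟨r - 2 ^ m, by omega⟩
      have hs : s < 2 ^ m := by omega
      have hre : 2 ^ m + s = s + 2 ^ m * 1 := by ring
      have hdiv : (2 ^ m + s) / 2 ^ m = 1 := by
        rw [hre, Nat.add_mul_div_left _ _ hpos, Nat.div_eq_of_lt hs]
      have hmod : (2 ^ m + s) % 2 ^ m = s := by
        rw [hre, Nat.add_mul_mod_self_left, Nat.mod_eq_of_lt hs]
      have hsub : 2 ^ m + s - 2 ^ m = s := by omega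
      rcases h with rfl | rfl | rfl
      · rw [allL]; norm_num
        rw [skip 1 _ _ (by norm_num) (by omega), hsub, single 2 s (by norm_num) hs]
        simp [rankRec, hdiv, hmod]
      · rw [allL]; norm_num
        rw [skip 0 _ _ (by norm_num) (by omega), hsub, single 2 s (by norm_num) hs]
        simp [rankRec, hdiv, hmod]
      · rw [allL]; norm_num
        rw [skip 0 _ _ (by norm_num) (by omega), hsub, single 1 s (by norm_num) hs]
        simp [rankRec, hdiv, hmod]

lemma allL_top (m : Nat) (K : Nat) (hK : K < 3 * 2 ^ m) :
    (allL (m + 1) (-1))[K]? =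
      some (((K / 2 ^ m : Nat) : Int) :: rankRec m ((K / 2 ^ m : Nat) : Int) (K % 2 ^ m)) := by
  have hpos : 0 < 2 ^ m := Nat.two_pow_pos m
  have hlen : ∀ q : Int, q = 0 ∨ q = 1 ∨ q = 2 →
      ((allL m q).map (q :: ·)).length = 2 ^ m := by
    intro q hq; simp [allL_length m q hq]
  have single : ∀ (q : Int) (j : Nat), q = 0 ∨ q = 1 ∨ q = 2 → j < 2 ^ m →
      ((allL m q).map (q :: ·))[j]? = some (q :: rankRec m q j) := by
    intro q j hq hj
    rw [List.getElem?_map, allL_getElem m q j hq hj]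
    rfl
  have take : ∀ (q : Int) (rest : List (List Int)) (j : Nat), q = 0 ∨ q = 1 ∨ q = 2 →
      j < 2 ^ m → ((allL m q).map (q :: ·) ++ rest)[j]? = some (q :: rankRec m q j) := by
    intro q rest j hq hj
    rw [List.getElem?_append_left (by rw [hlen q hq]; exact hj), single q j hq hj]
  have skip : ∀ (q : Int) (rest : List (List Int)) (j : Nat), q = 0 ∨ q = 1 ∨ q = 2 →
      2 ^ m ≤ j → ((allL m q).map (q :: ·) ++ rest)[j]? = rest[j - 2 ^ m]? := by
    intro q rest j hq hj
    rw [List.getElem?_append_right (by rw [hlen q hq]; omega), hlen q hq]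
  by_cases h0 : K < 2 ^ m
  · have hdiv : K / 2 ^ m = 0 := Nat.div_eq_of_lt h0
    have hmod : K % 2 ^ m = K := Nat.mod_eq_of_lt h0
    rw [hdiv, hmod, allL]; norm_num
    rw [take 0 _ K (by norm_num) h0]
  · by_cases h1 : K < 2 ^ m + 2 ^ m
    · obtain ⟨s, rfl⟩ : ∃ s, K = 2 ^ m + s := ⟨K - 2 ^ m, by omega⟩
      have hs : s < 2 ^ m := by omega
      have hre : 2 ^ m + s = s + 2 ^ m * 1 := by ring
      have hdiv : (2 ^ m + s) / 2 ^ m = 1 := by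
        rw [hre, Nat.add_mul_div_left _ _ hpos, Nat.div_eq_of_lt hs]
      have hmod : (2 ^ m + s) % 2 ^ m = s := by
        rw [hre, Nat.add_mul_mod_self_left, Nat.mod_eq_of_lt hs]
      rw [hdiv, hmod, allL]; norm_num
      rw [skip 0 _ _ (by norm_num) (by omega), show 2 ^ m + s - 2 ^ m = s by omega,
        take 1 _ s (by norm_num) hs]
    · obtain ⟨s, rfl⟩ : ∃ s, K = 2 ^ m + (2 ^ m + s) := ⟨K - 2 ^ m - 2 ^ m, by omega⟩
      have hs : s < 2 ^ m := by omega
      have hre : 2 ^ m + (2 ^ m + s) = s + 2 ^ m * 2 := by ring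
      have hdiv : (2 ^ m + (2 ^ m + s)) / 2 ^ m = 2 := by
        rw [hre, Nat.add_mul_div_left _ _ hpos, Nat.div_eq_of_lt hs]
      have hmod : (2 ^ m + (2 ^ m + s)) % 2 ^ m = s := by
        rw [hre, Nat.add_mul_mod_self_left, Nat.mod_eq_of_lt hs]
      rw [hdiv, hmod, allL]; norm_num
      rw [skip 0 _ _ (by norm_num) (by omega), show 2 ^ m + (2 ^ m + s) - 2 ^ m = 2 ^ m + s by omega,
        skip 1 _ _ (by norm_num) (by omega), show 2 ^ m + s - 2 ^ m = s by omega,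
        single 2 s (by norm_num) hs]

lemma solveAltLoop_eq_rankRec (c : Nat) (d : Int) (K : Nat) (digits : List Int) :
    solveAltLoop c ((2 ^ c : Nat) : Int) d ((K : Nat) : Int) digits = digits ++ rankRec c d K := by
  induction c generalizing d K digits with
  | zero => simp [solveAltLoop, rankRec]
  | succ c ih =>
    have e1 : PySem.Int.floordiv ((2 ^ (c + 1) : Nat) : Int) 2 = ((2 ^ c : Nat) : Int) := by
      rw [PySem.Int.floordiv_eq_ediv_of_pos (by norm_num),
        show ((2 ^ (c + 1) : Nat) : Int) = ((2 ^ c : Nat) : Int) * 2 by push_cast [pow_succ]; ring,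
        Int.mul_ediv_cancel _ (by norm_num)]
    have e2 : PySem.Int.floordiv ((K : Nat) : Int) ((2 ^ c : Nat) : Int) = ((K / 2 ^ c : Nat) : Int) :=
      PySem.Int.floordiv_natCast K (2 ^ c)
    have e3 : PySem.Int.mod ((K : Nat) : Int) ((2 ^ c : Nat) : Int) = ((K % 2 ^ c : Nat) : Int) :=
      PySem.Int.mod_natCast K (2 ^ c)
    rw [solveAltLoop]
    simp only [e1, e2, e3]
    rw [ih]
    simp [rankRec]

lemma allL_neg_length (m : Nat) : (allL (m + 1) (-1)).length = 3 * 2 ^ m := by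
  rw [allL]
  norm_num [allL_length m 0 (by norm_num), allL_length m 1 (by norm_num),
    allL_length m 2 (by norm_num)]
  ring

theorem solve_spec : Claim_equal_solve := by
  unfold Claim_equal_solve
  intro n k hdom hpre
  unfold Spec_solve
  obtain ⟨hn, hk⟩ := hpre
  obtain ⟨K, rfl⟩ : ∃ K : Nat, k = (K : Int) := ⟨k.toNat, by omega⟩
  have hKt : ((K : Int)).toNat = K := by omega
  by_cases hn0 : n = 0
  · subst hn0
    rw [solve, solve_alt, if_pos le_rfl]
    rw [show (Int.toNat 0) = 0 from rfl, btA, if_pos rfl]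
    cases K with
    | zero =>
      show pyJoinDigits [] = ""
      decide
    | succ j =>
      rw [hKt]
      simp
  · have hn1 : 1 ≤ n := by omega
    set m : Nat := (n - 1).toNat with hm
    have hnt : n.toNat = m + 1 := by omega
    have hP : ((2 ^ m : Nat) : Int) = (2 : Int) ^ m := by push_cast; ring
    have hA : btA n (m + 1) 0 (-1) [] (K + 1) =
        ((allL (m + 1) (-1)).map pyJoinDigits).take (K + 1) := by
      rw [btA_eq_allL n (m + 1) 0 (-1) [] (K + 1) (by omega) le_rfl]
      simp
    have hdt : ∀ (l : List String), ((l.take (K + 1)).drop K).headD "" = (l[K]?).getD "" := by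
      intro l
      rw [List.drop_take, show K + 1 - K = 1 by omega]
      rcases h : l.drop K with _ | ⟨a, t⟩
      · have hK : l[K]? = none := by rw [← List.head?_drop, h]; rfl
        simp [hK]
      · have hK : l[K]? = some a := by rw [← List.head?_drop, h]; rfl
        simp [hK]
    rw [solve, hnt, hKt, hA, hdt, List.getElem?_map]
    rw [solve_alt, if_neg (by omega)]
    simp only [← hm, ← hP]
    by_cases hKlt : K < 3 * 2 ^ m
    · rw [if_neg (by push_cast; omega), allL_top m K hKlt,
        PySem.Int.floordiv_natCast, PySem.Int.mod_natCast,
        show ([((K / 2 ^ m : Nat) : Int)] : List Int) = [] ++ [((K / 2 ^ m : Nat) : Int)] by simp,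
        solveAltLoop_eq_rankRec m _ (K % 2 ^ m) _]
      simp
    · rw [if_pos (by push_cast; omega),
        List.getElem?_eq_none (by rw [allL_neg_length]; omega)]
      simp
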